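-- pv_equiv track=rewrite | github.com/anjaeha/CodingTest | 프로그래머스_문제풀이/영어끝말잇기.py | solution
-- ===== SOURCE A (Python) =====
-- def solution(n, words):
--     data = set([words[0]])
--     now = words[0]
--
--     for i in range(1, len(words)):
--         if now[-1] == words[i][0] and words[i] not in data:
--             data.add(words[i])
--             now = words[i]
--         else:
--             return [i % n + 1, i // n + 1]
--
--     return [0, 0]
-- ===== SOURCE B (Python) =====
-- def solution(n, words):
--     # first duplicate position (len(words) if none) -- membership only, no indexing
--     seen = set()
--     dup = len(words)
--     for i, w in enumerate(words):
--         if w in seen: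
--             dup = i
--             break
--         seen.add(w)
--     # first chain break strictly before the duplicate
--     idx = dup
--     for i in range(1, dup):
--         if words[i - 1][-1] != words[i][0]:
--             idx = i
--             break
--     if idx == len(words):
--         return [0, 0]
--     return [idx % n + 1, idx // n + 1]
-- ===== Notes on version B (the rewrite author's own statement) =====
-- stated objective: alternative
-- what changed: Replaces A's single early-exit pass carrying a running set and 'now' word with two separate scans: first-duplicate position via a membership-only pass, then a chain-break scan bounded by that position, combined into one failure index.
import Mathlib
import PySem

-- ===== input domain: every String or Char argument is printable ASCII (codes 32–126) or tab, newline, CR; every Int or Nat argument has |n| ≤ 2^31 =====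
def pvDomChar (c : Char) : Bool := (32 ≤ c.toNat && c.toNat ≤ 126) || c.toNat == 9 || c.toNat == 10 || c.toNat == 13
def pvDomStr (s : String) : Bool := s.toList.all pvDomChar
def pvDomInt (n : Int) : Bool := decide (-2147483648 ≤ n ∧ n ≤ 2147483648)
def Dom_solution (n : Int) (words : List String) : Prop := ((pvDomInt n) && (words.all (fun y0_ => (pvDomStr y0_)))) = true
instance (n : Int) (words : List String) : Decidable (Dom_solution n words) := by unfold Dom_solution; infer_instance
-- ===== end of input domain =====

-- B replaces A's single early-exit pass (running set + current word) with two separate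
-- scans — first-duplicate position by membership only, then a chain-break scan bounded by
-- it — combined into one failure index (alternative decomposition, same cost).


-- ===== PORT A =====
-- A's 'for i in range(1, len(words))' loop with early return; 'now' is the last accepted word,
-- 'data' the set of accepted words. The [] result stands for Python's IndexError on an empty
-- word (excluded by Pre_solution).
def solGoA (n : Int) (words : List String) (data : PySem.Set String) (now : String) (i : Nat) : List Int :=
  if h : i < words.length then
    match PySem.Str.pyGet? now (-1), PySem.Str.pyGet? (words[i]) 0 with
    | some c, some d =>
      if c == d && !(PySem.Set.contains data (words[i])) then
        solGoA n words (PySem.Set.add data (words[i])) (words[i]) (i + 1)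
      else [PySem.Int.mod (i : Int) n + 1, PySem.Int.floordiv (i : Int) n + 1]
    | _, _ => []
  else [0, 0]
termination_by words.length - i

def solution (n : Int) (words : List String) : List Int :=
  match words with
  | [] => []   -- Python: IndexError on words[0] (excluded by Pre_solution)
  | w0 :: _ => solGoA n words (PySem.Set.ofList [w0]) w0 1

-- ===== PORT B =====
-- B's first loop (enumerate with break): first index (counting from i) whose word is already
-- in seen; none if no duplicate ('dup = len(words)' default is applied at the call site).
def altDup (ws : List String) (seen : PySem.Set String) (i : Nat) : Option Nat :=
  match ws with
  | [] => none
  | w :: rest =>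
    if PySem.Set.contains seen w then some i
    else altDup rest (PySem.Set.add seen w) (i + 1)

-- B's second loop 'for i in range(1, dup)' with break at the first mismatch; idx defaults to
-- dup. Indices are in range (i < dup ≤ len), so getD only feeds pyGet?, whose none branch
-- stands for Python's IndexError on an empty word (outside Pre_solution).
def altBrk (words : List String) (dup : Nat) (i : Nat) : Nat :=
  if i < dup then
    match PySem.Str.pyGet? (words.getD (i - 1) "") (-1), PySem.Str.pyGet? (words.getD i "") 0 with
    | some c, some d => if c != d then i else altBrk words dup (i + 1)
    | _, _ => dup
  else dup
termination_by dup - i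

def solution_alt (n : Int) (words : List String) : List Int :=
  let dup := (altDup words PySem.Set.empty 0).getD words.length
  let idx := altBrk words dup 1
  if idx = words.length then [0, 0]
  else [PySem.Int.mod (idx : Int) n + 1, PySem.Int.floordiv (idx : Int) n + 1]

-- ===== PRECONDITION & SPEC =====
-- a chain break at position k, stated over total option heads/lasts (an empty word "breaks")
def MismatchAt (words : List String) (k : Nat) : Prop :=
  (words.getD (k - 1) "").toList.getLast? ≠ (words.getD k "").toList.head?

-- a repeated word at position k
def DupAt (words : List String) (k : Nat) : Prop :=
  ∃ j ∈ List.range k, words.getD j "" = words.getD k ""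

def FailAt (words : List String) (k : Nat) : Prop := MismatchAt words k ∨ DupAt words k

def FirstFailAt (words : List String) (s : Nat) : Prop :=
  1 ≤ s ∧ FailAt words s ∧ ∀ i ∈ List.range s, 1 ≤ i → ¬ FailAt words i

-- Pre_ excludes exactly the inputs on which A raises: an empty words list (IndexError on
-- words[0]), an empty word at a position A's loop reaches (words[0] empty with ≥ 2 words, or
-- the first failure position holding the empty word), and n = 0 when a failure exists
-- (ZeroDivisionError).
def Pre_solution (n : Int) (words : List String) : Prop :=
  words ≠ [] ∧
    (words.length = 1 ∨
      (words.getD 0 "" ≠ "" ∧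
        ∀ s ∈ List.range words.length, FirstFailAt words s →
          (words.getD s "" ≠ "" ∧ n ≠ 0)))
instance (n : Int) (words : List String) : Decidable (Pre_solution n words) := by
  unfold Pre_solution FirstFailAt FailAt MismatchAt DupAt; infer_instance

def pvWitness_solution : Int × List String := (2, ["ab", "bc", "ca", "ab"])

def Spec_solution (n : Int) (words : List String) (out : List Int) : Prop := out = solution_alt n words
instance (n : Int) (words : List String) (out : List Int) : Decidable (Spec_solution n words out) := by unfold Spec_solution; infer_instance

-- ===== CLAIM (what is proved, stated in full; the proofs are below) =====
def Claim_equal_solution : Prop := ∀ (n : Int) (words : List String), Dom_solution n words → Pre_solution n words → Spec_solution n words (solution n words)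

-- ===== LEMMAS AND PROOFS =====

-- the common "render a failure index" tail of both programs
def renderIdx (n : Int) (words : List String) (idx : Nat) : List Int :=
  if idx = words.length then [0, 0]
  else [PySem.Int.mod (idx : Int) n + 1, PySem.Int.floordiv (idx : Int) n + 1]

theorem altDup_ge (ws : List String) (seen : PySem.Set String) (i j : Nat)
    (h : altDup ws seen i = some j) : i ≤ j := by
  induction ws generalizing seen i with
  | nil => simp [altDup] at h
  | cons w rest ih =>
    simp only [altDup] at h
    split at h
    · simp at h; omega
    · have := ih _ _ h; omega

theorem pyGet?_neg_one_str (s : String) :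
    PySem.Str.pyGet? s (-1) = s.toList.getLast? := by
  simp [PySem.Str.pyGet?, PySem.Chars.pyGet?_eq_listPyGet?, PySem.List.pyGet?_neg_one]

theorem pyGet?_zero_str (s : String) :
    PySem.Str.pyGet? s 0 = s.toList.head? := by
  simp [PySem.Str.pyGet?, PySem.Chars.pyGet?_eq_listPyGet?, PySem.List.pyGet?_zero]
  cases s.toList <;> simp

-- a nonempty string indexes to some at -1 and at 0
theorem pyGet?_ne_empty (s : String) (hs : s ≠ "") (k : Int)
    (hk : k = -1 ∨ k = 0) : ∃ c, PySem.Str.pyGet? s k = some c := by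
  have hl : s.toList ≠ [] := fun h => hs (String.toList_eq_nil_iff.mp h)
  rcases hk with rfl | rfl
  · simp [PySem.Str.pyGet?, PySem.Chars.pyGet?_eq_listPyGet?, PySem.List.pyGet?_neg_one]
    exact Option.isSome_iff_exists.mp (List.getLast?_isSome.mpr hl)
  · simp [PySem.Str.pyGet?, PySem.Chars.pyGet?_eq_listPyGet?, PySem.List.pyGet?_zero]
    cases hl2 : s.toList with
    | nil => exact absurd hl2 hl
    | cons a t => simp

theorem altBrk_step (words : List String) (dup i : Nat) (h : i < dup) (c d : Char)
    (hc : PySem.Str.pyGet? (words.getD (i - 1) "") (-1) = some c)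
    (hd : PySem.Str.pyGet? (words.getD i "") 0 = some d) :
    altBrk words dup i = if c != d then i else altBrk words dup (i + 1) := by
  rw [altBrk, if_pos h, hc, hd]

-- the nonemptiness the loops actually need: all words nonempty, or a failure at some k ≥ i
-- with words[0..k] nonempty (neither loop runs past it)
def NeOk (words : List String) (i : Nat) : Prop :=
  (∀ w ∈ words, w ≠ "") ∨
    ∃ k, i ≤ k ∧ k < words.length ∧ (∀ j ≤ k, words.getD j "" ≠ "") ∧ FailAt words k

-- loop correspondence: A's loop from i (seen = accepted words, now = words[i-1]) computes the
-- rendering of B's chain-break scan from i bounded by B's first-duplicate scan from i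
theorem solGo_eq (n : Int) (words : List String)
    (i : Nat) (hi : 1 ≤ i) (hil : i ≤ words.length) (hw : NeOk words i)
    (seen : PySem.Set String)
    (hseen : ∀ j, j < i → words.getD j "" ∈ seen) :
    solGoA n words seen (words[i - 1]'(by omega)) i
      = renderIdx n words
          (altBrk words ((altDup (words.drop i) seen i).getD words.length) i) := by
  induction hn : words.length - i generalizing i seen with
  | zero =>
    have hie : i = words.length := by omega
    rw [solGoA, altBrk]
    simp [hie, altDup, renderIdx]
  | succ m ih =>
    have hlt : i < words.length := by omega
    have hne1 : (words[i-1]'(by omega)) ≠ "" := by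
      rcases hw with hw | ⟨k, hik, hkl, hpre, _⟩
      · exact hw _ (by simp)
      · have := hpre (i-1) (by omega)
        simpa [List.getD, List.getElem?_eq_getElem (show i-1 < words.length by omega)] using this
    have hne2 : (words[i]'hlt) ≠ "" := by
      rcases hw with hw | ⟨k, hik, hkl, hpre, _⟩
      · exact hw _ (by simp)
      · have := hpre i (by omega)
        simpa [List.getD, List.getElem?_eq_getElem hlt] using this
    obtain ⟨c, hc⟩ := pyGet?_ne_empty (words[i-1]'(by omega)) hne1 (-1) (Or.inl rfl)
    obtain ⟨d, hd⟩ := pyGet?_ne_empty (words[i]'hlt) hne2 0 (Or.inr rfl)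
    have hg1 : words.getD (i-1) "" = words[i-1]'(by omega) := by
      simp [List.getD, List.getElem?_eq_getElem (show i-1 < words.length by omega)]
    have hg2 : words.getD i "" = words[i]'hlt := by
      simp [List.getD, List.getElem?_eq_getElem hlt]
    have hdrop : words.drop i = words[i] :: words.drop (i + 1) :=
      List.drop_eq_getElem_cons hlt
    rw [solGoA]
    simp only [hlt, dif_pos, hc, hd, hdrop, altDup]
    by_cases hmem : (words[i]'hlt) ∈ seen
    · -- duplicate at i: A returns the formula at i; B's dup bound is i, so altBrk yields i
      have hcont : PySem.Set.contains seen (words[i]'hlt) = true :=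
        (PySem.Set.contains_iff _ _).mpr hmem
      rw [altBrk]
      simp [hmem, renderIdx, show i ≠ words.length by omega]
    · have hcont : PySem.Set.contains seen (words[i]'hlt) = false := by
        simp [hmem]
      have hdup' : i + 1 ≤ (altDup (words.drop (i+1)) (PySem.Set.add seen (words[i]'hlt)) (i+1)).getD words.length := by
        cases hA : altDup (words.drop (i+1)) (PySem.Set.add seen (words[i]'hlt)) (i+1) with
        | none => simpa using hlt
        | some j => simpa using altDup_ge _ _ _ _ hA
      by_cases hcd : c = d
      · -- accepted step: both sides recurse
        have hw' : NeOk words (i+1) := by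
          rcases hw with hw | ⟨k, hik, hkl, hpre, hmis⟩
          · exact Or.inl hw
          · refine Or.inr ⟨k, ?_, hkl, hpre, hmis⟩
            rcases Nat.lt_or_ge i k with h | h
            · omega
            · exfalso
              have hki : k = i := by omega
              rcases hmis with hm | hdp
              · apply hm
                rw [hki, hg1, hg2, ← pyGet?_neg_one_str, ← pyGet?_zero_str, hc, hd, hcd]
              · obtain ⟨j, hj, hje⟩ := hdp
                rw [List.mem_range, hki] at hj
                apply hmem
                have := hseen j hj
                rwa [hje, hki, hg2] at this
        have hseen' : ∀ j, j < i + 1 → words.getD j "" ∈ PySem.Set.add seen (words[i]'hlt) := by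
          intro j hj
          rcases Nat.lt_or_ge j i with h | h
          · exact (PySem.Set.mem_add _ _ _).mpr (Or.inl (hseen j h))
          · have : j = i := by omega
            rw [this, hg2]
            exact (PySem.Set.mem_add _ _ _).mpr (Or.inr rfl)
        have hrec := ih (i+1) (by omega) (by omega) hw' (PySem.Set.add seen (words[i]'hlt)) hseen' (by omega)
        simp only [Nat.add_sub_cancel] at hrec
        simp only [hcd, hcont, Bool.not_false, beq_self_eq_true, Bool.and_self, if_pos, Bool.false_eq_true, if_false]
        rw [hrec]
        congr 1
        rw [altBrk_step words _ i (by omega) c d (by rw [hg1]; exact hc) (by rw [hg2]; exact hd)]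
        simp [hcd]
      · -- chain break at i: B's altBrk stops at i
        have hA : altBrk words ((altDup (words.drop (i+1)) (PySem.Set.add seen (words[i]'hlt)) (i+1)).getD words.length) i = i := by
          rw [altBrk_step words _ i (by omega) c d (by rw [hg1]; exact hc) (by rw [hg2]; exact hd)]
          simp [bne_iff_ne, hcd]
        rw [hcont]
        simp only [Bool.not_false, Bool.and_true, Bool.false_eq_true, if_false]
        rw [if_neg (by simp [hcd]), hA, renderIdx, if_neg (by omega)]

-- ===== VERDICT (by name: the statement is the Claim_ definition above) =====
theorem solution_spec : Claim_equal_solution := by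
  intro n words _ ⟨hne, hw2⟩
  unfold Spec_solution
  match words with
  | [] => exact absurd rfl hne
  | [w0] =>
    simp [solution, solGoA, solution_alt, altDup, altBrk,
      PySem.Set.contains, PySem.Set.empty]
  | w0 :: w1 :: rest =>
    rcases hw2 with h1 | ⟨hw0, hpre⟩
    · simp at h1
    · have hNe : NeOk (w0 :: w1 :: rest) 1 := by
        by_cases hall : ∀ w ∈ (w0 :: w1 :: rest), w ≠ ""
        · exact Or.inl hall
        · rw [not_forall] at hall
          simp only [Classical.not_imp, not_not] at hall
          obtain ⟨w, hwmem, hwe⟩ := hall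
          have hPex : ∃ E, E < (w0 :: w1 :: rest).length ∧ (w0 :: w1 :: rest).getD E "" = "" := by
            obtain ⟨E, hEl, hEe⟩ := List.mem_iff_getElem.mp hwmem
            exact ⟨E, hEl, by simp [List.getD, List.getElem?_eq_getElem hEl, hEe, hwe]⟩
          obtain ⟨hElt, hEe⟩ := Nat.find_spec hPex
          have hE1 : 1 ≤ Nat.find hPex := by
            rcases Nat.eq_zero_or_pos (Nat.find hPex) with h | h
            · exact absurd (h ▸ hEe) hw0
            · exact h
          have hlts : ∀ j < Nat.find hPex, (w0 :: w1 :: rest).getD j "" ≠ "" := by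
            intro j hj
            have := Nat.find_min hPex hj
            intro he
            exact this ⟨by omega, he⟩
          have hmisE : MismatchAt (w0 :: w1 :: rest) (Nat.find hPex) := by
            unfold MismatchAt
            have h1 : ((w0 :: w1 :: rest).getD (Nat.find hPex - 1) "").toList ≠ [] := by
              intro h
              exact hlts (Nat.find hPex - 1) (by omega) (String.toList_eq_nil_iff.mp h)
            rw [hEe]
            simp only [String.toList_empty, List.head?_nil]
            intro h
            exact h1 (List.getLast?_eq_none_iff.mp h)
          have hQdec : DecidablePred (fun s => 1 ≤ s ∧ s < (w0 :: w1 :: rest).length ∧ FailAt (w0 :: w1 :: rest) s) := by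
            intro s; unfold FailAt MismatchAt DupAt; infer_instance
          have hQex : ∃ s, 1 ≤ s ∧ s < (w0 :: w1 :: rest).length ∧ FailAt (w0 :: w1 :: rest) s :=
            ⟨Nat.find hPex, hE1, hElt, Or.inl hmisE⟩
          obtain ⟨hs1, hslt, hsf⟩ := Nat.find_spec hQex
          have hff : FirstFailAt (w0 :: w1 :: rest) (Nat.find hQex) := by
            refine ⟨hs1, hsf, ?_⟩
            intro i hi h1i
            rw [List.mem_range] at hi
            have := Nat.find_min hQex hi
            intro hf
            exact this ⟨h1i, by omega, hf⟩
          obtain ⟨hsne, hn0⟩ := hpre (Nat.find hQex) (List.mem_range.mpr hslt) hff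
          have hsE : Nat.find hQex < Nat.find hPex := by
            have hle : Nat.find hQex ≤ Nat.find hPex :=
              Nat.find_min' hQex ⟨hE1, hElt, Or.inl hmisE⟩
            rcases Nat.lt_or_ge (Nat.find hQex) (Nat.find hPex) with h | h
            · exact h
            · exact absurd (by rw [show Nat.find hQex = Nat.find hPex by omega]; exact hEe) hsne
          exact Or.inr ⟨Nat.find hQex, hs1, hslt,
            fun j hj => hlts j (by omega), hsf⟩
      have hseen1 : ∀ j, j < 1 → (w0 :: w1 :: rest).getD j "" ∈ PySem.Set.ofList [w0] := by
        intro j hj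
        have : j = 0 := by omega
        subst this
        simp [PySem.Set.ofList, PySem.Set.add, PySem.Set.empty, PySem.Set.contains]
      have heq := solGo_eq n (w0 :: w1 :: rest) 1 le_rfl (by simp) hNe (PySem.Set.ofList [w0]) hseen1
      have hstep : altDup (w0 :: w1 :: rest) PySem.Set.empty 0
          = altDup (w1 :: rest) (PySem.Set.add PySem.Set.empty w0) 1 := by
        simp [altDup, PySem.Set.empty, PySem.Set.contains]
      rw [solution]
      refine heq.trans ?_
      rw [renderIdx, show (w0 :: w1 :: rest).drop 1 = w1 :: rest from rfl,
        show PySem.Set.ofList [w0] = PySem.Set.add PySem.Set.empty w0 from rfl, ← hstep]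
      rfl
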